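-- pv_equiv track=rewrite | github.com/Admiral-Fish/python-scripts | tinymt_reverse.py | unBitshiftRightXor
-- ===== SOURCE A (Python) =====
-- def uint(num: int):
--     return num & 0xFFFFFFFF
--
-- def unBitshiftRightXor(value: int, shift: int):
--     i = 0
--     result = 0
--
--     while i * shift < 32:
--         partMask = uint(0xFFFFFFFF << (32 - shift)) >> (shift * i)
--         part = value & partMask
--         value ^= part >> shift
--         result |= part
--         i += 1
--
--     return result
-- ===== SOURCE B (Python) =====
-- def unBitshiftRightXor(value, shift):
--     # inverse of y = x ^ (x >> shift) on 32-bit values, via the XOR telescope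
--     # x = y ^ (y >> shift) ^ (y >> 2*shift) ^ ...
--     result = value & 0xFFFFFFFF
--     temp = result >> shift
--     while temp:
--         result ^= temp
--         temp >>= shift
--     return result
-- ===== Notes on version B (the rewrite author's own statement) =====
-- stated objective: simpler
-- what changed: Instead of reconstructing the value chunk by chunk with recomputed part masks (uint(0xFFFFFFFF << (32-shift)) >> shift*i), B folds the whole 32-bit value at once with the XOR telescope x = y ^ (y>>s) ^ (y>>2s) ^ ..., maintaining only a running result and a shrinking temp.
import Mathlib
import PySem

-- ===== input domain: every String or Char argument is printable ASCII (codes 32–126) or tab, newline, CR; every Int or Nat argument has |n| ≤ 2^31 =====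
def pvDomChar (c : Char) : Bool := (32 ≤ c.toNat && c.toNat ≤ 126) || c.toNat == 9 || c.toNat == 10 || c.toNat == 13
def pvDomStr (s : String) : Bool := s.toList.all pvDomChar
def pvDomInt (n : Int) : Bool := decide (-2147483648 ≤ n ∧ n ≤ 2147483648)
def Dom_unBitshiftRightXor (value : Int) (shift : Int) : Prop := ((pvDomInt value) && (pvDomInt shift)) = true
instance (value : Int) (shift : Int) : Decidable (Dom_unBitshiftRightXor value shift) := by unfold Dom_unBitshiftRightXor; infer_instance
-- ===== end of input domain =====

-- B replaces A's chunk-by-chunk reconstruction through recomputed part masks by the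
-- XOR telescope x = y ^ (y>>s) ^ (y>>2s) ^ …, folding the value with one xor and one
-- shift per iteration (objective: simpler).

-- ===== PORT A =====
def pvUint (num : Int) : Int := PySem.Int.band num 4294967295

-- the while loop of A; fuel 33 bounds the at most 32 iterations taken under Pre_
def pvLoopA : Nat → Int → Int → Int → Int → Int
  | 0, _, _, result, _ => result
  | fuel+1, i, value, result, shift =>
    if i * shift < 32 then
      let partMask : Int := (pvUint (4294967295 <<< (32 - shift).toNat)) >>> (shift * i).toNat
      let part : Int := PySem.Int.band value partMask
      let value' := PySem.Int.bxor value (part >>> shift.toNat)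
      let result' := PySem.Int.bor result part
      pvLoopA fuel (i + 1) value' result' shift
    else result

def unBitshiftRightXor (value : Int) (shift : Int) : Int :=
  pvLoopA 33 0 value 0 shift

-- ===== PORT B =====
-- the while loop of B; fuel 33 bounds the at most 32 iterations taken under Pre_
def pvLoopB : Nat → Int → Int → Int → Int
  | 0, result, _, _ => result
  | fuel+1, result, temp, shift =>
    if temp ≠ 0 then
      pvLoopB fuel (PySem.Int.bxor result temp) (temp >>> shift.toNat) shift
    else result

def unBitshiftRightXor_alt (value : Int) (shift : Int) : Int :=
  let result := PySem.Int.band value 4294967295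
  pvLoopB 33 result (result >>> shift.toNat) shift

-- ===== PRECONDITION & SPEC =====
-- Pre_ excludes exactly the inputs on which A does not return: shift < 0 and
-- shift > 32 raise ValueError ('negative shift count'), and shift = 0 loops forever.
def Pre_unBitshiftRightXor (value : Int) (shift : Int) : Prop := 1 ≤ shift ∧ shift ≤ 32
instance (value : Int) (shift : Int) : Decidable (Pre_unBitshiftRightXor value shift) := by
  unfold Pre_unBitshiftRightXor; infer_instance

def pvWitness_unBitshiftRightXor : Int × Int := (123456789, 7)

def Spec_unBitshiftRightXor (value : Int) (shift : Int) (out : Int) : Prop := out = unBitshiftRightXor_alt value shift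
instance (value : Int) (shift : Int) (out : Int) : Decidable (Spec_unBitshiftRightXor value shift out) := by unfold Spec_unBitshiftRightXor; infer_instance

-- ===== CLAIM (what is proved, stated in full; the proofs are below) =====
def Claim_equal_unBitshiftRightXor : Prop := ∀ (value : Int) (shift : Int), Dom_unBitshiftRightXor value shift → Pre_unBitshiftRightXor value shift → Spec_unBitshiftRightXor value shift (unBitshiftRightXor value shift)

-- ===== LEMMAS AND PROOFS =====

-- the low 32 bits of an integer, as a natural number
def pvLow32 (a : Int) : Nat := (a % (4294967296 : Int)).toNat

-- the XOR telescope t ^^^ (t >>> s) ^^^ (t >>> 2*s) ^^^ …, to depth f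
def pvTele (s : Nat) : Nat → Nat → Nat
  | 0, _ => 0
  | f+1, t => t ^^^ pvTele s f (t >>> s)

lemma pvLow32_lt (a : Int) : pvLow32 a < 2 ^ 32 := by
  unfold pvLow32
  have h1 : 0 ≤ a % (4294967296 : Int) := Int.emod_nonneg a (by norm_num)
  have h2 : a % (4294967296 : Int) < 4294967296 := Int.emod_lt_of_pos a (by norm_num)
  omega

lemma pvLow32_natCast (n : Nat) : pvLow32 (n : Int) = n % 2 ^ 32 := by
  unfold pvLow32
  have : ((n : Int) % (4294967296 : Int)) = ((n % 4294967296 : Nat) : Int) := by push_cast; rfl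
  rw [this, Int.toNat_natCast]; norm_num

lemma pvLow32_negSucc (n : Nat) : pvLow32 (Int.negSucc n) = 2 ^ 32 - 1 - n % 2 ^ 32 := by
  unfold pvLow32
  obtain ⟨q, r, hr, hqr⟩ : ∃ q r : Nat, r < 2 ^ 32 ∧ n = 2 ^ 32 * q + r :=
    ⟨n / 2 ^ 32, n % 2 ^ 32, Nat.mod_lt _ (by norm_num), (Nat.div_add_mod n (2 ^ 32)).symm⟩
  have h1 : Int.negSucc n = ((2 ^ 32 - 1 - r : Nat) : Int) + 4294967296 * (-(q + 1)) := by
    rw [Int.negSucc_eq]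
    push_cast [hqr]
    omega
  rw [h1, Int.add_mul_emod_self_left]
  rw [Int.emod_eq_of_lt (by positivity) (by push_cast; omega)]
  rw [Int.toNat_natCast]
  omega

lemma pvSub_and (m k : Nat) : m - (m &&& k) = m ^^^ (m &&& k) := by
  induction m using Nat.strongRecOn generalizing k with
  | ind m ih =>
    rcases Nat.eq_zero_or_pos m with hm | hm
    · subst hm; simp
    · have hd2 : (m &&& k) / 2 = m / 2 &&& k / 2 := Nat.and_div_two
      have hx2 : (m ^^^ (m &&& k)) / 2 = m / 2 ^^^ (m &&& k) / 2 := Nat.xor_div_two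
      have hdm : (m &&& k) % 2 = m % 2 &&& k % 2 := by
        have := Nat.and_mod_two_pow (a := m) (b := k) (n := 1)
        simpa using this
      have hxm : (m ^^^ (m &&& k)) % 2 = m % 2 ^^^ (m &&& k) % 2 := by
        have := Nat.xor_mod_two_pow (a := m) (b := m &&& k) (n := 1)
        simpa using this
      have hle : m / 2 &&& k / 2 ≤ m / 2 := Nat.and_le_left
      have IH : m / 2 - (m / 2 &&& k / 2) = m / 2 ^^^ (m / 2 &&& k / 2) :=
        ih (m / 2) (by omega) (k / 2)
      rw [hd2] at hx2
      rcases Nat.mod_two_eq_zero_or_one m with h1 | h1 <;>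
        rcases Nat.mod_two_eq_zero_or_one k with h2 | h2 <;>
        rw [h1, h2] at hdm <;>
        simp only [show (0 &&& 0 : Nat) = 0 from rfl, show (0 &&& 1 : Nat) = 0 from rfl,
          show (1 &&& 0 : Nat) = 0 from rfl, show (1 &&& 1 : Nat) = 1 from rfl] at hdm <;>
        rw [h1, hdm] at hxm <;>
        simp only [show (0 ^^^ 0 : Nat) = 0 from rfl, show (0 ^^^ 1 : Nat) = 1 from rfl,
          show (1 ^^^ 0 : Nat) = 1 from rfl, show (1 ^^^ 1 : Nat) = 0 from rfl] at hxm <;>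
        omega

lemma pvTestBit_high {m : Nat} (j : Nat) (hm : m < 2 ^ 32) (hj : 32 ≤ j) :
    m.testBit j = false :=
  Nat.testBit_lt_two_pow (lt_of_lt_of_le hm (Nat.pow_le_pow_right (by norm_num) hj))

lemma pvBand_eq (a : Int) (m : Nat) (hm : m < 2 ^ 32) :
    PySem.Int.band a (m : Int) = ((pvLow32 a &&& m : Nat) : Int) := by
  cases a with
  | ofNat n =>
    simp only [Int.ofNat_eq_natCast, PySem.Int.band_natCast, pvLow32_natCast]
    congr 1
    apply Nat.eq_of_testBit_eq
    intro j
    simp only [Nat.testBit_and, Nat.testBit_mod_two_pow]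
    by_cases hj : j < 32
    · simp [hj]
    · simp [pvTestBit_high j hm (by omega)]
  | negSucc n =>
    have h1 : ¬ (0 : Int) ≤ Int.negSucc n := not_le.mpr (Int.negSucc_lt_zero n)
    have h2 : (-(Int.negSucc n) - 1) = (n : Int) := by rw [Int.negSucc_eq]; ring
    simp only [PySem.Int.band, h1, if_false, Int.natCast_nonneg, if_true, h2,
      Int.toNat_natCast]
    rw [pvLow32_negSucc]
    congr 1
    rw [pvSub_and]
    apply Nat.eq_of_testBit_eq
    intro j
    have hlt : n % 2 ^ 32 < 2 ^ 32 := Nat.mod_lt _ (by norm_num)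
    rw [show 2 ^ 32 - 1 - n % 2 ^ 32 = 2 ^ 32 - (n % 2 ^ 32 + 1) by omega]
    simp only [Nat.testBit_xor, Nat.testBit_and, Nat.testBit_two_pow_sub_succ hlt,
      Nat.testBit_mod_two_pow]
    by_cases hj : j < 32
    · simp only [hj, decide_true, Bool.true_and]
      cases m.testBit j <;> cases n.testBit j <;> rfl
    · simp [pvTestBit_high j hm (by omega)]

lemma pvBxor_negSucc' (n c : Nat) :
    PySem.Int.bxor (Int.negSucc n) (c : Int) = Int.negSucc (n ^^^ c) := by
  have h1 : ¬ (0 : Int) ≤ Int.negSucc n := not_le.mpr (Int.negSucc_lt_zero n)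
  have h2 : (-(Int.negSucc n) - 1) = (n : Int) := by rw [Int.negSucc_eq]; ring
  simp only [PySem.Int.bxor, h1, if_false, Int.natCast_nonneg, if_true, h2,
    Int.toNat_natCast]
  rw [Int.negSucc_eq]
  push_cast
  ring

lemma pvLow32_bxor (a : Int) (c : Nat) (hc : c < 2 ^ 32) :
    pvLow32 (PySem.Int.bxor a (c : Int)) = pvLow32 a ^^^ c := by
  cases a with
  | ofNat n =>
    simp only [Int.ofNat_eq_natCast, PySem.Int.bxor_natCast, pvLow32_natCast]
    rw [Nat.xor_mod_two_pow, Nat.mod_eq_of_lt hc]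
  | negSucc n =>
    rw [pvBxor_negSucc', pvLow32_negSucc, pvLow32_negSucc]
    apply Nat.eq_of_testBit_eq
    intro j
    have hlt1 : (n ^^^ c) % 2 ^ 32 < 2 ^ 32 := Nat.mod_lt _ (by norm_num)
    have hlt2 : n % 2 ^ 32 < 2 ^ 32 := Nat.mod_lt _ (by norm_num)
    rw [show 2 ^ 32 - 1 - (n ^^^ c) % 2 ^ 32 = 2 ^ 32 - ((n ^^^ c) % 2 ^ 32 + 1) by omega,
      show 2 ^ 32 - 1 - n % 2 ^ 32 = 2 ^ 32 - (n % 2 ^ 32 + 1) by omega]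
    simp only [Nat.testBit_xor, Nat.testBit_two_pow_sub_succ hlt1,
      Nat.testBit_two_pow_sub_succ hlt2, Nat.testBit_mod_two_pow]
    by_cases hj : j < 32
    · simp only [hj, decide_true, Bool.true_and]
      cases n.testBit j <;> cases c.testBit j <;> rfl
    · simp [pvTestBit_high j hc (by omega)]

lemma pvBxor_bxor (v : Int) (a b : Nat) :
    PySem.Int.bxor (PySem.Int.bxor v (a : Int)) (b : Int) = PySem.Int.bxor v ((a ^^^ b : Nat) : Int) := by
  cases v with
  | ofNat n =>
    simp only [Int.ofNat_eq_natCast, PySem.Int.bxor_natCast, Nat.xor_assoc]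
  | negSucc n => rw [pvBxor_negSucc', pvBxor_negSucc', pvBxor_negSucc', Nat.xor_assoc]

lemma pvTele_zero (s f : Nat) : pvTele s f 0 = 0 := by
  induction f with
  | zero => rfl
  | succ f ih => simp [pvTele, ih]

lemma pvTele_shiftRight (s f t : Nat) : pvTele s f t >>> s = pvTele s f (t >>> s) := by
  induction f generalizing t with
  | zero => simp [pvTele]
  | succ f ih => simp [pvTele, Nat.shiftRight_xor_distrib, ih]

lemma pvTele_stab (s f t : Nat) (ht : t < 2 ^ (f * s)) : pvTele s (f + 1) t = pvTele s f t := by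
  induction f generalizing t with
  | zero =>
    simp at ht
    simp [ht, pvTele_zero, pvTele]
  | succ f ih =>
    have h : t >>> s < 2 ^ (f * s) := by
      rw [Nat.shiftRight_eq_div_pow]
      rw [Nat.div_lt_iff_lt_mul (Nat.pow_pos (by norm_num : 0 < 2))]
      calc t < 2 ^ ((f+1) * s) := ht
        _ ≤ 2 ^ (f * s) * 2 ^ s := by rw [← Nat.pow_add]; exact Nat.pow_le_pow_right (by norm_num) (by ring_nf; omega)
    show pvTele s (f+2) t = pvTele s (f+1) t
    have h2 : pvTele s (f+1) (t >>> s) = pvTele s f (t >>> s) := ih _ h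
    simp only [pvTele] at h2 ⊢
    rw [h2]

lemma pvTele_lt (s f t : Nat) (ht : t < 2 ^ 32) : pvTele s f t < 2 ^ 32 := by
  induction f generalizing t with
  | zero => simpa [pvTele] using ht
  | succ f ih =>
    simp only [pvTele]
    exact Nat.xor_lt_two_pow ht (ih _ (by
      have := Nat.shiftRight_le t s
      omega))

-- key equation: X = y ^^^ (X >>> s) for the full telescope X of y
lemma pvTele_key (s y : Nat) (hs : 1 ≤ s) (hy : y < 2 ^ 32) :
    pvTele s 34 y = y ^^^ (pvTele s 34 y >>> s) := by
  rw [pvTele_shiftRight]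
  have h : y >>> s < 2 ^ (33 * s) := by
    have h1 : y >>> s ≤ y := Nat.shiftRight_le y s
    have h2 : (2:Nat) ^ 32 ≤ 2 ^ (33 * s) := Nat.pow_le_pow_right (by norm_num) (by nlinarith)
    omega
  rw [show (34 : Nat) = 33 + 1 from rfl, pvTele_stab s 33 (y >>> s) h]
  rfl

lemma pvCastShiftRight (p s : Nat) : ((p : Nat) : Int) >>> s = ((p >>> s : Nat) : Int) := rfl

lemma pvLoopB_eq (sh : Int) : ∀ (f : Nat) (r t : Nat),
    pvLoopB f (r : Int) (t : Int) sh = ((r ^^^ pvTele sh.toNat f t : Nat) : Int) := by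
  intro f
  induction f with
  | zero => intro r t; simp [pvLoopB, pvTele]
  | succ f ih =>
    intro r t
    by_cases ht : t = 0
    · subst ht
      simp [pvLoopB, pvTele_zero, pvTele]
    · have ht' : ((t : Nat) : Int) ≠ 0 := by exact_mod_cast ht
      simp only [pvLoopB, ht', ne_eq, not_false_eq_true, if_true]
      rw [PySem.Int.bxor_natCast, pvCastShiftRight, ih]
      rw [Nat.xor_assoc]
      rfl

lemma pvAlt_eq (value shift : Int) (h1 : 1 ≤ shift) :
    unBitshiftRightXor_alt value shift = ((pvTele shift.toNat 34 (pvLow32 value) : Nat) : Int) := by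
  unfold unBitshiftRightXor_alt
  rw [show (4294967295 : Int) = ((4294967295 : Nat) : Int) from rfl,
    pvBand_eq value 4294967295 (by norm_num)]
  rw [show pvLow32 value &&& 4294967295 = pvLow32 value by
    rw [show (4294967295 : Nat) = 2 ^ 32 - 1 from rfl, Nat.and_two_pow_sub_one_eq_mod,
      Nat.mod_eq_of_lt (pvLow32_lt value)]]
  show pvLoopB 33 ((pvLow32 value : Nat) : Int) (((pvLow32 value : Nat) : Int) >>> shift.toNat) shift
    = ((pvTele shift.toNat 34 (pvLow32 value) : Nat) : Int)
  rw [pvCastShiftRight, pvLoopB_eq]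
  rfl

lemma pvChunk_testBit (X d t : Nat) :
    ((X >>> d) <<< d).testBit t = (decide (d ≤ t) && X.testBit t) := by
  simp only [Nat.testBit_shiftLeft, Nat.testBit_shiftRight, ge_iff_le]
  by_cases h : d ≤ t
  · simp only [h, decide_true, Bool.true_and]
    congr 1
    omega
  · simp [h]

lemma pvMask_testBit (s iN j : Nat) :
    ((((4294967295 <<< (32 - s)) &&& 4294967295) >>> (s * iN)).testBit j)
      = (decide (32 - s ≤ s * iN + j) && decide (s * iN + j < 32)) := by
  rw [show (4294967295 : Nat) = 2 ^ 32 - 1 from rfl]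
  simp only [Nat.testBit_shiftRight, Nat.testBit_and, Nat.testBit_shiftLeft,
    Nat.testBit_two_pow_sub_one, ge_iff_le]
  by_cases h1 : 32 - s ≤ s * iN + j <;> by_cases h2 : s * iN + j < 32 <;>
    simp [h1, h2] <;> omega

lemma pvMask_lt (s iN : Nat) :
    (((4294967295 <<< (32 - s)) &&& 4294967295) >>> (s * iN)) < 2 ^ 32 := by
  have h1 : ((4294967295 <<< (32 - s)) &&& 4294967295) ≤ 4294967295 := Nat.and_le_right
  have h2 := Nat.shiftRight_le ((4294967295 <<< (32 - s)) &&& 4294967295) (s * iN)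
  omega

lemma pvChunk_le (X d : Nat) : (X >>> d) <<< d ≤ X := by
  rw [Nat.shiftLeft_eq, Nat.shiftRight_eq_div_pow]
  exact Nat.div_mul_le_self X (2 ^ d)

-- reconstructed chunk agrees with the telescope on the current mask window
lemma pvClaimC (s iN y X : Nat) (hlt : s * iN < 32)
    (hkey : X = y ^^^ (X >>> s)) :
    (y ^^^ (((X >>> (32 - s * iN)) <<< (32 - s * iN)) >>> s))
        &&& ((((4294967295 <<< (32 - s)) &&& 4294967295) >>> (s * iN)))
      = X &&& ((((4294967295 <<< (32 - s)) &&& 4294967295) >>> (s * iN))) := by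
  apply Nat.eq_of_testBit_eq
  intro j
  rw [Nat.testBit_and, Nat.testBit_and, pvMask_testBit, Nat.testBit_xor,
    Nat.testBit_shiftRight, pvChunk_testBit]
  by_cases h1 : 32 - s ≤ s * iN + j
  · by_cases h2 : s * iN + j < 32
    · have hd : 32 - s * iN ≤ s + j := by omega
      have hXj : X.testBit j = xor (y.testBit j) (X.testBit (s + j)) := by
        conv_lhs => rw [hkey]
        simp [Nat.testBit_xor, Nat.testBit_shiftRight]
      simp only [hd, decide_true, Bool.true_and, h1, h2, hXj]
    · simp [h2]
  · simp [h1]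

lemma pvClaimD_xor (s iN X : Nat) (hlt : s * iN < 32) (hX : X < 2 ^ 32) :
    ((X >>> (32 - s * iN)) <<< (32 - s * iN))
        ^^^ (X &&& ((((4294967295 <<< (32 - s)) &&& 4294967295) >>> (s * iN))))
      = (X >>> (32 - s * iN - s)) <<< (32 - s * iN - s) := by
  apply Nat.eq_of_testBit_eq
  intro j
  rw [Nat.testBit_xor, pvChunk_testBit, Nat.testBit_and, pvMask_testBit, pvChunk_testBit]
  by_cases hXj : X.testBit j
  · have hj32 : j < 32 := by
      by_contra h
      rw [pvTestBit_high j hX (by omega)] at hXj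
      simp at hXj
    simp only [hXj, Bool.and_true]
    by_cases h1 : 32 - s * iN ≤ j <;> by_cases h2 : 32 - s ≤ s * iN + j <;>
      by_cases h3 : s * iN + j < 32 <;> by_cases h4 : 32 - s * iN - s ≤ j <;>
      simp [h1, h2, h3, h4] <;> omega
  · simp only [Bool.not_eq_true] at hXj
    simp [hXj]

lemma pvClaimD_or (s iN X : Nat) (hlt : s * iN < 32) (hX : X < 2 ^ 32) :
    ((X >>> (32 - s * iN)) <<< (32 - s * iN))
        ||| (X &&& ((((4294967295 <<< (32 - s)) &&& 4294967295) >>> (s * iN))))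
      = (X >>> (32 - s * iN - s)) <<< (32 - s * iN - s) := by
  apply Nat.eq_of_testBit_eq
  intro j
  rw [Nat.testBit_or, pvChunk_testBit, Nat.testBit_and, pvMask_testBit, pvChunk_testBit]
  by_cases hXj : X.testBit j
  · have hj32 : j < 32 := by
      by_contra h
      rw [pvTestBit_high j hX (by omega)] at hXj
      simp at hXj
    simp only [hXj, Bool.and_true]
    by_cases h1 : 32 - s * iN ≤ j <;> by_cases h2 : 32 - s ≤ s * iN + j <;>
      by_cases h3 : s * iN + j < 32 <;> by_cases h4 : 32 - s * iN - s ≤ j <;>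
      simp [h1, h2, h3, h4] <;> omega
  · simp only [Bool.not_eq_true] at hXj
    simp [hXj]

-- the A-side loop invariant: result holds the already-reconstructed high chunk of X
lemma pvLoopA_inv (s y : Nat) (hs : 1 ≤ s) (hs32 : s ≤ 32) (v : Int) (hy : y = pvLow32 v) :
    ∀ (fuel iN : Nat), 32 ≤ s * (iN + fuel) →
    pvLoopA fuel (iN : Int)
      (PySem.Int.bxor v ((((pvTele s 34 y >>> (32 - s * iN)) <<< (32 - s * iN)) >>> s : Nat) : Int))
      (((pvTele s 34 y >>> (32 - s * iN)) <<< (32 - s * iN) : Nat) : Int)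
      (s : Int)
    = ((pvTele s 34 y : Nat) : Int) := by
  have hy32 : y < 2 ^ 32 := hy ▸ pvLow32_lt v
  have hX : pvTele s 34 y < 2 ^ 32 := pvTele_lt s 34 y hy32
  have hkey : pvTele s 34 y = y ^^^ (pvTele s 34 y >>> s) := pvTele_key s y hs hy32
  intro fuel
  induction fuel with
  | zero =>
    intro iN hbound
    rw [Nat.add_zero] at hbound
    have hd : 32 - s * iN = 0 := by omega
    simp [pvLoopA, hd]
  | succ fuel ih =>
    intro iN hbound
    by_cases hlt : s * iN < 32
    · have hlt' : iN * s < 32 := by rw [Nat.mul_comm]; exact hlt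
      have hcond : ((iN : Int) * (s : Int) < 32) := by
        rw [← Nat.cast_mul]
        exact_mod_cast hlt'
      simp only [pvLoopA, if_pos hcond]
      have e1 : ((32 : Int) - (s : Int)).toNat = 32 - s := by omega
      have e2 : (((s : Int)) * (iN : Int)).toNat = s * iN := by
        rw [← Nat.cast_mul, Int.toNat_natCast]
      have e3 : ((s : Int)).toNat = s := Int.toNat_natCast s
      rw [e1, e2, e3]
      have eM : pvUint (((4294967295 <<< (32 - s) : Nat)) : Int) >>> (s * iN)
          = ((((4294967295 <<< (32 - s)) &&& 4294967295) >>> (s * iN) : Nat) : Int) := by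
        unfold pvUint
        rw [show (4294967295 : Int) = ((4294967295 : Nat) : Int) from rfl, PySem.Int.band_natCast]
        rw [pvCastShiftRight]
      rw [eM]
      have hMlt := pvMask_lt s iN
      rw [pvBand_eq _ _ hMlt]
      have hch : ((pvTele s 34 y >>> (32 - s * iN)) <<< (32 - s * iN)) >>> s < 2 ^ 32 := by
        have h1 := pvChunk_le (pvTele s 34 y) (32 - s * iN)
        have h2 := Nat.shiftRight_le ((pvTele s 34 y >>> (32 - s * iN)) <<< (32 - s * iN)) s
        omega
      rw [pvLow32_bxor v _ hch, ← hy]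
      rw [pvClaimC s iN y (pvTele s 34 y) hlt hkey]
      rw [pvCastShiftRight, pvBxor_bxor, PySem.Int.bor_natCast]
      rw [← Nat.shiftRight_xor_distrib, pvClaimD_xor s iN (pvTele s 34 y) hlt hX,
        pvClaimD_or s iN (pvTele s 34 y) hlt hX]
      have e4 : 32 - s * iN - s = 32 - s * (iN + 1) := by
        have : s * (iN + 1) = s * iN + s := by ring
        omega
      rw [e4]
      have e5 : ((iN : Int) + 1) = ((iN + 1 : Nat) : Int) := by push_cast; ring
      rw [e5]
      have e6 : iN + 1 + fuel = iN + (fuel + 1) := by omega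
      exact ih (iN + 1) (by rw [e6]; exact hbound)
    · have hlt' : ¬ iN * s < 32 := by rw [Nat.mul_comm]; exact hlt
      have hcond : ¬ ((iN : Int) * (s : Int) < 32) := by
        rw [← Nat.cast_mul]
        exact_mod_cast hlt'
      rw [pvLoopA, if_neg hcond]
      have hd : 32 - s * iN = 0 := by omega
      simp [hd]

-- ===== VERDICT (by name: the statement is the Claim_ definition above) =====
theorem unBitshiftRightXor_spec : Claim_equal_unBitshiftRightXor := by
  intro value shift _ hpre
  obtain ⟨h1, h2⟩ := hpre
  unfold Spec_unBitshiftRightXor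
  have hs : (1 : Nat) ≤ shift.toNat := by omega
  have hs32 : shift.toNat ≤ 32 := by omega
  have hsh : shift = ((shift.toNat : Nat) : Int) := by omega
  set s := shift.toNat with hsdef
  have hX : pvTele s 34 (pvLow32 value) < 2 ^ 32 := pvTele_lt s 34 _ (pvLow32_lt value)
  have hch0 : (pvTele s 34 (pvLow32 value) >>> (32 - s * 0)) <<< (32 - s * 0) = 0 := by
    have : pvTele s 34 (pvLow32 value) >>> 32 = 0 := by
      rw [Nat.shiftRight_eq_div_pow]
      exact Nat.div_eq_of_lt hX
    simp [this]
  have hmain := pvLoopA_inv s (pvLow32 value) hs hs32 value rfl 33 0 (by omega)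
  rw [hch0] at hmain
  simp only [Nat.zero_shiftRight, Nat.cast_zero, PySem.Int.bxor_zero, Nat.cast_ofNat] at hmain
  unfold unBitshiftRightXor
  rw [pvAlt_eq value shift (by omega)]
  rw [hsh]
  exact hmain
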